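-- pv_equiv track=rewrite | github.com/TaxisNet/harmonic_map_multirobot_exploration | src/boundary_extraction.py | get_contours_by_hierarchy
-- ===== SOURCE A (Python) =====
-- def get_contours_by_hierarchy(contours, hierarchy ):
--     #!!!!!!!!do not use!!!!!!
--
--
--     # Organize contours by hierarchy level
--     organized_contours = []
--
--     # Create a dictionary to hold the hierarchy levels and corresponding contours
--     hierarchy_dict = {}
--
--     for i, contour in enumerate(contours):
--         level = hierarchy[0][i][3]  # Get the hierarchy level of the contour
--         if level not in hierarchy_dict:
--             hierarchy_dict[level] = []
--         hierarchy_dict[level].append(i)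
--
--     # Sort contours within each hierarchy level
--     for level in sorted(hierarchy_dict.keys()):
--         organized_contours.append(hierarchy_dict[level])
--
--     return organized_contours
-- ===== SOURCE B (Python) =====
-- def get_contours_by_hierarchy(contours, hierarchy):
--     # Sort the index range by (level, index); then one pass collapses
--     # consecutive equal-level runs into groups.
--     idx = sorted(range(len(contours)), key=lambda i: (hierarchy[0][i][3], i))
--     out = []
--     prev = None
--     for i in idx:
--         lvl = hierarchy[0][i][3]
--         if out and prev == lvl:
--             out[-1].append(i)
--         else:
--             out.append([i])
--         prev = lvl
--     return out
-- ===== Notes on version B (the rewrite author's own statement) =====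
-- stated objective: alternative
-- what changed: Replaces A's dict-bucketing-by-level followed by sorting the dict keys with a single stable sort of the index range by (level, index) followed by one linear pass that groups consecutive equal-level runs.
import Mathlib
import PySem

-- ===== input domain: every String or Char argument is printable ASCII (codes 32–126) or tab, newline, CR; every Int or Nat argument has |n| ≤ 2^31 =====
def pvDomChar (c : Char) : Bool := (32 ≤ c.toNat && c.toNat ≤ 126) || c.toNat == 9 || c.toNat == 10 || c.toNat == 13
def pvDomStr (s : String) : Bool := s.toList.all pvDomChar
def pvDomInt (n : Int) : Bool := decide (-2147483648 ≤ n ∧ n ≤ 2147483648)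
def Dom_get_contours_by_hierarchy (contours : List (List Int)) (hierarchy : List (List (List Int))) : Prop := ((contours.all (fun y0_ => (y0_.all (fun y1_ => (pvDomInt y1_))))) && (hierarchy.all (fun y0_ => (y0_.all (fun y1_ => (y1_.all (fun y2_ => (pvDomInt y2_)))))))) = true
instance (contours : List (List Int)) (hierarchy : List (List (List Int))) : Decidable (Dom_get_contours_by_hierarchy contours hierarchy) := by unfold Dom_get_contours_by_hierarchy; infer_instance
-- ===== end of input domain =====

-- B replaces A's dict-bucketing-then-sort-keys with a sort of the index range by
-- (level, index) followed by one linear grouping pass (objective: alternative).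

-- ===== PORT A =====
-- literal port of A: bucket indices in a dict keyed by hierarchy[0][i][3], then
-- emit the buckets for the sorted keys.  The `.getD` defaults on pyGet? are never
-- reached on inputs admitted by Pre_ (Python would raise IndexError there).
def get_contours_by_hierarchy (contours : List (List Int)) (hierarchy : List (List (List Int))) : List (List Int) :=
  let hierarchy_dict : PySem.Dict Int (List Int) :=
    (PySem.List.enumerate contours).foldl (fun d p =>
      let level : Int :=
        (PySem.List.pyGet? ((PySem.List.pyGet? ((PySem.List.pyGet? hierarchy 0).getD []) p.1).getD []) 3).getD 0
      let d' := if d.contains level = true then d else d.insert level []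
      d'.modify level [] (fun xs => xs ++ [p.1])) PySem.Dict.empty
  (PySem.List.sorted hierarchy_dict.keys (fun x => x)).foldl
    (fun acc level => acc ++ [hierarchy_dict.getD level []]) []

-- ===== PORT B =====
-- literal port of B: sort range(len(contours)) by the tuple key (level, i) —
-- ported through the lexicographic product order, exact for Python tuples —
-- then one pass grouping consecutive equal-level runs.
def get_contours_by_hierarchy_alt (contours : List (List Int)) (hierarchy : List (List (List Int))) : List (List Int) :=
  let lvl : Int → Int := fun i =>
    (PySem.List.pyGet? ((PySem.List.pyGet? ((PySem.List.pyGet? hierarchy 0).getD []) i).getD []) 3).getD 0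
  let idx := PySem.List.sorted (PySem.List.pyRange 0 (PySem.List.len contours)) (fun i => toLex (lvl i, i))
  (idx.foldl (fun s i =>
      if s.1 ≠ [] ∧ s.2 = some (lvl i) then
        (s.1.dropLast ++ [s.1.getLastD [] ++ [i]], some (lvl i))
      else
        (s.1 ++ [[i]], some (lvl i))) (([], none) : List (List Int) × Option Int)).1

-- ===== PRECONDITION & SPEC =====
-- Pre_ excludes exactly the inputs where Python A raises IndexError reading
-- hierarchy[0][i][3] for some contour index i (hierarchy empty, hierarchy[0]
-- shorter than contours, or a row with fewer than 4 entries).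
def Pre_get_contours_by_hierarchy (contours : List (List Int)) (hierarchy : List (List (List Int))) : Prop :=
  contours = [] ∨ (hierarchy ≠ [] ∧ contours.length ≤ hierarchy.headI.length ∧
    ∀ r ∈ hierarchy.headI.take contours.length, 4 ≤ r.length)
instance (contours : List (List Int)) (hierarchy : List (List (List Int))) : Decidable (Pre_get_contours_by_hierarchy contours hierarchy) := by unfold Pre_get_contours_by_hierarchy; infer_instance
def pvWitness_get_contours_by_hierarchy : List (List Int) × List (List (List Int)) :=
  ([[0], [1]], [[[1, 1, 1, 5], [2, 2, 2, -1]]])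
def Spec_get_contours_by_hierarchy (contours : List (List Int)) (hierarchy : List (List (List Int))) (out : List (List Int)) : Prop := out = get_contours_by_hierarchy_alt contours hierarchy
instance (contours : List (List Int)) (hierarchy : List (List (List Int))) (out : List (List Int)) : Decidable (Spec_get_contours_by_hierarchy contours hierarchy out) := by unfold Spec_get_contours_by_hierarchy; infer_instance

-- ===== CLAIM (what is proved, stated in full; the proofs are below) =====
def Claim_equal_get_contours_by_hierarchy : Prop := ∀ (contours : List (List Int)) (hierarchy : List (List (List Int))), Dom_get_contours_by_hierarchy contours hierarchy → Pre_get_contours_by_hierarchy contours hierarchy → Spec_get_contours_by_hierarchy contours hierarchy (get_contours_by_hierarchy contours hierarchy)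

-- ===== LEMMAS AND PROOFS =====

-- A's loop body: the contains-check-then-insert-[] followed by an appending modify
-- equals a single modify with default [].
theorem pv_body_eq (d : PySem.Dict Int (List Int)) (level i : Int) :
    (if d.contains level = true then d else d.insert level []).modify level [] (fun xs => xs ++ [i])
      = d.modify level [] (fun xs => xs ++ [i]) := by
  by_cases h : d.contains level = true
  · rw [if_pos h]
  · rw [if_neg h]
    have h' : d.contains level = false := by simpa using h
    simp [PySem.Dict.modify, PySem.Dict.getD_insert_self, PySem.Dict.insert_insert_self,
      PySem.Dict.getD_of_not_contains, h']

-- A's dict fold: the bucket stored at key c.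
theorem pv_dictA_getD (lvl : Int → Int) (js : List Int) (c : Int) :
    ((js.foldl (fun d j => d.modify (lvl j) [] (fun xs => xs ++ [j])) PySem.Dict.empty).getD c [])
      = js.filter (fun j => lvl j == c) := by
  have h := PySem.Dict.getD_foldl_modify_append (js.map (fun j => ((lvl j), j)))
    (PySem.Dict.empty : PySem.Dict Int (List Int)) c
  rw [List.foldl_map, List.filter_map, List.map_map] at h
  simpa [Function.comp_def, PySem.Dict.getD_of_not_contains, PySem.Dict.contains_empty] using h

-- A's dict fold: the key list.
theorem pv_dictA_keys (lvl : Int → Int) (js : List Int) :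
    ((js.foldl (fun d j => d.modify (lvl j) [] (fun xs => xs ++ [j])) PySem.Dict.empty).keys)
      = PySem.Set.ofList (js.map lvl) := by
  have h := PySem.Dict.keys_foldl_modify_key js lvl []
    (fun _ j => fun xs => xs ++ [j]) (PySem.Dict.empty : PySem.Dict Int (List Int))
  simpa [PySem.Dict.empty, PySem.Dict.keys, PySem.Set.update_nil_left] using h

-- flatMap of per-level filters over a covering duplicate-free level list is a
-- permutation of the underlying index list.
theorem pv_perm_flatMap_filter (lvl : Int → Int) :
    ∀ (ls : List Int), ls.Nodup → ∀ (js : List Int), (∀ j ∈ js, lvl j ∈ ls) →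
      (ls.flatMap (fun c => js.filter (fun j => lvl j == c))).Perm js := by
  intro ls
  induction ls with
  | nil =>
    intro _ js hall
    have : js = [] := by
      cases js with
      | nil => rfl
      | cons a t => exact absurd (hall a (by simp)) (by simp)
    simp [this]
  | cons c ls ih =>
    intro hnd js hall
    have hcls : c ∉ ls := (List.nodup_cons.mp hnd).1
    have hnd' : ls.Nodup := (List.nodup_cons.mp hnd).2
    rw [List.flatMap_cons]
    have hfix : ∀ c' ∈ ls, js.filter (fun j => lvl j == c')
        = (js.filter (fun j => !(lvl j == c))).filter (fun j => lvl j == c') := by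
      intro c' hc'
      rw [List.filter_filter]
      apply List.filter_congr
      intro j hj
      by_cases h : lvl j = c'
      · have hne : c' ≠ c := fun he => hcls (he ▸ hc')
        simp [h, hne]
      · simp [h]
    have hmap : ls.flatMap (fun c' => js.filter (fun j => lvl j == c'))
        = ls.flatMap (fun c' => (js.filter (fun j => !(lvl j == c))).filter (fun j => lvl j == c')) := by
      rw [List.flatMap_def, List.flatMap_def, List.map_congr_left hfix]
    rw [hmap]
    have hperm := ih hnd' (js.filter (fun j => !(lvl j == c))) (by
      intro j hj
      have hj' := List.mem_filter.mp hj
      have hmem := hall j hj'.1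
      have hne : ¬ lvl j = c := by simpa using hj'.2
      rcases List.mem_cons.mp hmem with h | h
      · exact absurd h hne
      · exact h)
    exact (hperm.append_left _).trans (List.filter_append_perm _ js)

-- flatMap of per-level filters is strictly increasing in the key (level, index).
theorem pv_pairwise_flatMap (lvl : Int → Int) (js : List Int) (hjs : js.Pairwise (· < ·)) :
    ∀ (ls : List Int), ls.Pairwise (· < ·) →
      (ls.flatMap (fun c => js.filter (fun j => lvl j == c))).Pairwise
        (fun a b => (toLex (lvl a, a) : Int ×ₗ Int) < toLex (lvl b, b)) := by
  intro ls
  induction ls with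
  | nil => simp
  | cons c ls ih =>
    intro hls
    have hpc := List.pairwise_cons.mp hls
    rw [List.flatMap_cons]
    apply List.pairwise_append.mpr
    refine ⟨?_, ih hpc.2, ?_⟩
    · have hpf : (js.filter (fun j => lvl j == c)).Pairwise (· < ·) := hjs.filter _
      refine List.Pairwise.imp_of_mem ?_ hpf
      intro a b ha hb hab
      have ha' : lvl a = c := by simpa using (List.mem_filter.mp ha).2
      have hb' : lvl b = c := by simpa using (List.mem_filter.mp hb).2
      simp [Prod.Lex.toLex_lt_toLex, ha', hb', hab]
    · intro a ha b hb
      obtain ⟨c', hc', hbf⟩ := List.mem_flatMap.mp hb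
      have hac : lvl a = c := by simpa using (List.mem_filter.mp ha).2
      have hbc : lvl b = c' := by simpa using (List.mem_filter.mp hbf).2
      have hlt : c < c' := hpc.1 c' hc'
      simp [Prod.Lex.toLex_lt_toLex, hac, hbc, hlt]

-- B's grouping pass, running through one constant-level run: it keeps appending
-- to the last group.
theorem pv_run_within (lvl : Int → Int) (c : Int) :
    ∀ (g : List Int), (∀ i ∈ g, lvl i = c) →
      ∀ (acc : List (List Int)) (cur : List Int),
      (g.foldl (fun s i =>
        if s.1 ≠ [] ∧ s.2 = some (lvl i) then
          (s.1.dropLast ++ [s.1.getLastD [] ++ [i]], some (lvl i))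
        else
          (s.1 ++ [[i]], some (lvl i))) (acc ++ [cur], some c))
      = (acc ++ [cur ++ g], some c) := by
  intro g
  induction g with
  | nil => intro _ acc cur; simp
  | cons i g ih =>
    intro hg acc cur
    have hi : lvl i = c := hg i (by simp)
    rw [List.foldl_cons]
    rw [if_pos (by simp [hi])]
    rw [List.dropLast_concat, List.getLastD_concat, hi]
    have := ih (fun j hj => hg j (by simp [hj])) acc (cur ++ [i])
    rw [this]
    simp

-- B's grouping pass over a flatMap of nonempty constant-level runs with strictly
-- increasing levels rebuilds exactly the list of runs.
theorem pv_run_groups (lvl : Int → Int) (grp : Int → List Int) :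
    ∀ (ls : List Int), ls.Pairwise (· < ·) →
      (∀ c ∈ ls, grp c ≠ [] ∧ ∀ i ∈ grp c, lvl i = c) →
      ∀ (acc : List (List Int)) (prev : Option Int), (∀ c ∈ ls, prev ≠ some c) →
      ((ls.flatMap grp).foldl (fun s i =>
        if s.1 ≠ [] ∧ s.2 = some (lvl i) then
          (s.1.dropLast ++ [s.1.getLastD [] ++ [i]], some (lvl i))
        else
          (s.1 ++ [[i]], some (lvl i))) (acc, prev)).1
      = acc ++ ls.map grp := by
  intro ls
  induction ls with
  | nil => intro _ _ acc prev _; simp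
  | cons c ls ih =>
    intro hls hgood acc prev hprev
    have hpc := List.pairwise_cons.mp hls
    obtain ⟨hne, hmem⟩ := hgood c (by simp)
    obtain ⟨i0, g, hgc⟩ : ∃ i0 g, grp c = i0 :: g := by
      cases h : grp c with
      | nil => exact absurd h hne
      | cons a t => exact ⟨a, t, rfl⟩
    rw [List.flatMap_cons, List.foldl_append, hgc, List.foldl_cons]
    have hi0 : lvl i0 = c := hmem i0 (by simp [hgc])
    rw [if_neg (by
      rintro ⟨-, h2⟩
      have h2' : prev = some c := by simpa [hi0] using h2
      exact hprev c (by simp) h2')]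
    have hrun := pv_run_within lvl c g (fun j hj => hmem j (by simp [hgc, hj])) acc [i0]
    rw [hi0, hrun]
    simp only [List.singleton_append]
    have := ih hpc.2 (fun c' hc' => hgood c' (by simp [hc'])) (acc ++ [i0 :: g])
      (some c) (fun c' hc' h => (ne_of_lt (hpc.1 c' hc')) (Option.some.inj h))
    rw [this]
    simp [hgc]

-- B's whole computation, generically in the level function.
theorem pv_B_char (lvl : Int → Int) (js : List Int) (hjs : js.Pairwise (· < ·)) :
    ((PySem.List.sorted js (fun i => toLex ((lvl i, i) : Int × Int))).foldl (fun s i =>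
        if s.1 ≠ [] ∧ s.2 = some (lvl i) then
          (s.1.dropLast ++ [s.1.getLastD [] ++ [i]], some (lvl i))
        else
          (s.1 ++ [[i]], some (lvl i))) (([], none) : List (List Int) × Option Int)).1
      = (PySem.List.sorted (PySem.Set.ofList (js.map lvl)) (fun x => x)).map
          (fun c => js.filter (fun j => lvl j == c)) := by
  have hGnd : (PySem.List.sorted (PySem.Set.ofList (js.map lvl)) (fun x => x)).Nodup :=
    (PySem.List.sorted_perm _ _ _).nodup_iff.mpr (PySem.Set.nodup_ofList _)
  have hGmem : ∀ j ∈ js, lvl j ∈ PySem.List.sorted (PySem.Set.ofList (js.map lvl)) (fun x => x) := by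
    intro j hj
    rw [PySem.List.mem_sorted, PySem.Set.mem_ofList]
    exact List.mem_map_of_mem hj
  have hsort : PySem.List.sorted js (fun i => toLex ((lvl i, i) : Int × Int))
      = (PySem.List.sorted (PySem.Set.ofList (js.map lvl)) (fun x => x)).flatMap
          (fun c => js.filter (fun j => lvl j == c)) := by
    apply PySem.List.sorted_eq_of_perm_of_pairwise_lt
    · exact pv_perm_flatMap_filter lvl _ hGnd js hGmem
    · exact pv_pairwise_flatMap lvl js hjs _ (PySem.List.sorted_ofList_pairwise_lt _)
  rw [hsort]
  apply pv_run_groups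
  · exact PySem.List.sorted_ofList_pairwise_lt _
  · intro c hc
    rw [PySem.List.mem_sorted, PySem.Set.mem_ofList] at hc
    obtain ⟨j, hj, hjc⟩ := List.mem_map.mp hc
    constructor
    · exact List.ne_nil_of_mem (List.mem_filter.mpr ⟨hj, by simp [hjc]⟩)
    · intro i hi; simpa using (List.mem_filter.mp hi).2
  · intro c _ h; simp at h

-- ===== VERDICT (by name: the statement is the Claim_ definition above) =====
theorem get_contours_by_hierarchy_spec : Claim_equal_get_contours_by_hierarchy := by
  intro contours hierarchy _ _
  unfold Spec_get_contours_by_hierarchy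
  unfold get_contours_by_hierarchy get_contours_by_hierarchy_alt
  rw [PySem.List.enumerate_eq_map_pyRange contours [], List.foldl_map]
  simp only []
  rw [show (fun (d : PySem.Dict Int (List Int)) (j : Int) =>
        (if d.contains ((PySem.List.pyGet? ((PySem.List.pyGet? ((PySem.List.pyGet? hierarchy 0).getD []) j).getD []) 3).getD 0) = true then d
         else d.insert ((PySem.List.pyGet? ((PySem.List.pyGet? ((PySem.List.pyGet? hierarchy 0).getD []) j).getD []) 3).getD 0) []).modify
          ((PySem.List.pyGet? ((PySem.List.pyGet? ((PySem.List.pyGet? hierarchy 0).getD []) j).getD []) 3).getD 0) [] (fun xs => xs ++ [j]))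
      = (fun (d : PySem.Dict Int (List Int)) (j : Int) =>
        d.modify ((PySem.List.pyGet? ((PySem.List.pyGet? ((PySem.List.pyGet? hierarchy 0).getD []) j).getD []) 3).getD 0) [] (fun xs => xs ++ [j]))
    from funext fun d => funext fun j => pv_body_eq d _ j]
  rw [pv_dictA_keys, PySem.List.foldl_append_singleton_eq_map]
  rw [pv_B_char (fun i => (PySem.List.pyGet? ((PySem.List.pyGet? ((PySem.List.pyGet? hierarchy 0).getD []) i).getD []) 3).getD 0)
        (PySem.List.pyRange 0 (PySem.List.len contours)) (PySem.List.pairwise_lt_pyRange_one 0 _)]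
  simp only [pv_dictA_getD, List.nil_append]
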